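-- pv_equiv track=rewrite | github.com/PrimozBelej/SloTagger | main.py | filter_sents
-- ===== SOURCE A (Python) =====
-- def filter_sents(sents, tags, maxlen_word, maxlen_sent):
--     filtered_sents = []
--     filtered_tags = []
--     for i, sent in enumerate(sents):
--         if len(sent) <= maxlen_sent:
--             filtered_sents.append(sent)
--             filtered_tags.append(tags[i])
--     sents = filtered_sents
--     tags = filtered_tags
--
--     filtered_sents = []
--     filtered_tags = []
--     for i, sent in enumerate(sents):
--         if max([len(word) for word in sent]) <= maxlen_word:
--             filtered_sents.append(sent)
--             filtered_tags.append(tags[i])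
--     sents = filtered_sents
--     tags = filtered_tags
--     return sents, tags
-- ===== SOURCE B (Python) =====
-- def filter_sents(sents, tags, maxlen_word, maxlen_sent):
--     filtered_sents = []
--     filtered_tags = []
--     for sent, tag in zip(sents, tags):
--         if len(sent) <= maxlen_sent and max([len(word) for word in sent]) <= maxlen_word:
--             filtered_sents.append(sent)
--             filtered_tags.append(tag)
--     return filtered_sents, filtered_tags
-- ===== Notes on version B (the rewrite author's own statement) =====
-- stated objective: simpler
-- what changed: Replaces A's two sequential rebuild-the-lists passes (each re-enumerating and indexing tags[i]) with a single pass over zip(sents, tags) that appends the pair when both length conditions hold, short-circuiting so the max over an empty sentence is never taken when the sentence already fails the length filter.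
import Mathlib
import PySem

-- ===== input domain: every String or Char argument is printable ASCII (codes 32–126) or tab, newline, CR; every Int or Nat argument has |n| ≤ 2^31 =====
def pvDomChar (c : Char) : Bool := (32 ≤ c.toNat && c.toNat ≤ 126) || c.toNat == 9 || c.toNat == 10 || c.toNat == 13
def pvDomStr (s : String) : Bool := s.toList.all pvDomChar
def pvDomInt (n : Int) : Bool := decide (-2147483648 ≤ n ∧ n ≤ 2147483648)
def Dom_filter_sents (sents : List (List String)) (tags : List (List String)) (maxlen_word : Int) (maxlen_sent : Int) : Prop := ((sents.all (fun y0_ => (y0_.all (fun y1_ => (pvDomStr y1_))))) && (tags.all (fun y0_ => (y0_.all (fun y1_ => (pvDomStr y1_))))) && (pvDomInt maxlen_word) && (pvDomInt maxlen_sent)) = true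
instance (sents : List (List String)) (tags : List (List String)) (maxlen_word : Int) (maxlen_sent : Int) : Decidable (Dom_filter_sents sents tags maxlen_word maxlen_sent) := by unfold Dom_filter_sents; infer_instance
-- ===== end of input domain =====

-- B replaces A's two sequential rebuild passes by one pass over zip(sents, tags) testing both
-- length conditions at once (objective: simpler). Equivalence of RETURN values is proved on Pre_.

-- ===== PORT A =====
-- max([len(word) for word in sent]); Python raises ValueError on an empty list, excluded by Pre_
-- (the .getD 0 only totalises the port there).
def pvMaxWordLen (sent : List String) : Int :=
  (PySem.List.max? (sent.map (fun w => PySem.Str.len w)) (fun x => x)).getD 0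

-- one filter pass of A: 'for i, sent in enumerate(sents): if pred(sent): append sent, tags[i]'
-- (both of A's loops have exactly this shape); tags.getD i [] = tags[i], in range under Pre_.
def pvLoopA (pred : List String → Bool) (tags : List (List String)) :
    Nat → List (List String) → List (List String) → List (List String) →
    List (List String) × List (List String)
  | _, [], fs, ft => (fs, ft)
  | i, s :: rest, fs, ft =>
    if pred s then pvLoopA pred tags (i + 1) rest (fs ++ [s]) (ft ++ [tags.getD i []])
    else pvLoopA pred tags (i + 1) rest fs ft

def filter_sents (sents : List (List String)) (tags : List (List String)) (maxlen_word : Int) (maxlen_sent : Int) : List (List String) × List (List String) :=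
  let st1 := pvLoopA (fun s => decide (PySem.List.len s ≤ maxlen_sent)) tags 0 sents [] []
  pvLoopA (fun s => decide (pvMaxWordLen s ≤ maxlen_word)) st1.2 0 st1.1 [] []

-- ===== PORT B =====
-- single loop over zip(sents, tags); '&&' short-circuits like Python's 'and'.
def pvLoopB (maxlen_word maxlen_sent : Int) :
    List (List String × List String) → List (List String) → List (List String) →
    List (List String) × List (List String)
  | [], fs, ft => (fs, ft)
  | (s, t) :: rest, fs, ft =>
    if decide (PySem.List.len s ≤ maxlen_sent) && decide (pvMaxWordLen s ≤ maxlen_word) then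
      pvLoopB maxlen_word maxlen_sent rest (fs ++ [s]) (ft ++ [t])
    else pvLoopB maxlen_word maxlen_sent rest fs ft

def filter_sents_alt (sents : List (List String)) (tags : List (List String)) (maxlen_word : Int) (maxlen_sent : Int) : List (List String) × List (List String) :=
  pvLoopB maxlen_word maxlen_sent (sents.zip tags) [] []

-- ===== PRECONDITION & SPEC =====
-- Pre_ excludes exactly the inputs where A raises: an index i with len(sents[i]) <= maxlen_sent but
-- i >= len(tags) (IndexError at tags[i]), and an empty sentence passing the length filter
-- (ValueError from max([]) in the second loop).
def Pre_filter_sents (sents : List (List String)) (tags : List (List String)) (maxlen_word : Int) (maxlen_sent : Int) : Prop :=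
  (∀ i ∈ List.range sents.length,
      PySem.List.len (sents.getD i []) ≤ maxlen_sent → i < tags.length) ∧
  (∀ s ∈ sents, PySem.List.len s ≤ maxlen_sent → s ≠ [])
instance (sents : List (List String)) (tags : List (List String)) (maxlen_word : Int) (maxlen_sent : Int) : Decidable (Pre_filter_sents sents tags maxlen_word maxlen_sent) := by unfold Pre_filter_sents; infer_instance

def pvWitness_filter_sents : List (List String) × List (List String) × Int × Int :=
  ([["ab", "c"], ["x", "y", "z"], ["hello"]], [["A", "B"], ["C", "D", "E"], ["F"]], 3, 2)

def Spec_filter_sents (sents : List (List String)) (tags : List (List String)) (maxlen_word : Int) (maxlen_sent : Int) (out : List (List String) × List (List String)) : Prop := out = filter_sents_alt sents tags maxlen_word maxlen_sent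
instance (sents : List (List String)) (tags : List (List String)) (maxlen_word : Int) (maxlen_sent : Int) (out : List (List String) × List (List String)) : Decidable (Spec_filter_sents sents tags maxlen_word maxlen_sent out) := by unfold Spec_filter_sents; infer_instance

-- ===== CLAIM (what is proved, stated in full; the proofs are below) =====
def Claim_equal_filter_sents : Prop := ∀ (sents : List (List String)) (tags : List (List String)) (maxlen_word : Int) (maxlen_sent : Int), Dom_filter_sents sents tags maxlen_word maxlen_sent → Pre_filter_sents sents tags maxlen_word maxlen_sent → Spec_filter_sents sents tags maxlen_word maxlen_sent (filter_sents sents tags maxlen_word maxlen_sent)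

-- ===== LEMMAS AND PROOFS =====

-- one pass of A equals a filter over zip, provided tags[i] is in range for every passing index
theorem pvLoopA_eq (pred : List String → Bool) (tags : List (List String)) :
    ∀ (sents : List (List String)) (i : Nat) (fs ft : List (List String)),
    (∀ j (h : j < sents.length), pred sents[j] = true → i + j < tags.length) →
    pvLoopA pred tags i sents fs ft =
      (fs ++ ((sents.zip (tags.drop i)).filter (fun p => pred p.1)).map Prod.fst,
       ft ++ ((sents.zip (tags.drop i)).filter (fun p => pred p.1)).map Prod.snd) := by
  intro sents
  induction sents with
  | nil => intro i fs ft _; simp [pvLoopA]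
  | cons s rest ih =>
    intro i fs ft h
    have hrest : ∀ j (hj : j < rest.length), pred rest[j] = true → (i + 1) + j < tags.length := by
      intro j hj hp
      have := h (j + 1) (by simpa using Nat.succ_lt_succ hj) (by simpa using hp)
      omega
    by_cases hp : pred s = true
    · have hi : i < tags.length := by simpa using h 0 (by simp) (by simpa using hp)
      have hdrop : tags.drop i = tags[i] :: tags.drop (i + 1) := List.drop_eq_getElem_cons hi
      have step : pvLoopA pred tags i (s :: rest) fs ft =
          pvLoopA pred tags (i + 1) rest (fs ++ [s]) (ft ++ [tags.getD i []]) := by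
        simp [pvLoopA, hp]
      rw [step, ih (i + 1) (fs ++ [s]) (ft ++ [tags.getD i []]) hrest, hdrop]
      simp [List.filter_cons, hp, List.getD, List.getElem?_eq_getElem hi, List.append_assoc]
      refine ⟨?_, ?_⟩ <;> rw [hdrop] <;>
        simp [List.zip_cons_cons, List.filter_cons, hp, -List.getElem_cons_drop]
    · have hp' : pred s = false := by simpa using hp
      have step : pvLoopA pred tags i (s :: rest) fs ft =
          pvLoopA pred tags (i + 1) rest fs ft := by
        simp [pvLoopA, hp']
      by_cases hi : i < tags.length
      · have hdrop : tags.drop i = tags[i] :: tags.drop (i + 1) := List.drop_eq_getElem_cons hi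
        rw [step, ih (i + 1) fs ft hrest, hdrop]
        rw [show ((s :: rest).zip (tags[i] :: tags.drop (i + 1))) =
            (s, tags[i]) :: rest.zip (tags.drop (i + 1)) from List.zip_cons_cons ..]
        simp [List.filter_cons, hp']
      · have hd1 : tags.drop i = [] := List.drop_eq_nil_of_le (by omega)
        have hd2 : tags.drop (i + 1) = [] := List.drop_eq_nil_of_le (by omega)
        rw [step, ih (i + 1) fs ft hrest, hd1, hd2]
        simp

-- B's loop is the filter over the pair list by the conjoined condition
theorem pvLoopB_eq (mw ms : Int) :
    ∀ (pairs : List (List String × List String)) (fs ft : List (List String)),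
    pvLoopB mw ms pairs fs ft =
      (fs ++ (pairs.filter (fun p =>
          decide (PySem.List.len p.1 ≤ ms) && decide (pvMaxWordLen p.1 ≤ mw))).map Prod.fst,
       ft ++ (pairs.filter (fun p =>
          decide (PySem.List.len p.1 ≤ ms) && decide (pvMaxWordLen p.1 ≤ mw))).map Prod.snd) := by
  intro pairs
  induction pairs with
  | nil => intro fs ft; simp [pvLoopB]
  | cons p rest ih =>
    intro fs ft
    obtain ⟨s, t⟩ := p
    by_cases h1 : (s.length : Int) ≤ ms <;> by_cases h2 : pvMaxWordLen s ≤ mw <;>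
      simp [pvLoopB, h1, h2, ih, List.filter_cons]

-- ===== VERDICT (by name: the statement is the Claim_ definition above) =====
theorem filter_sents_spec : Claim_equal_filter_sents := by
  intro sents tags mw ms _ hpre
  unfold Spec_filter_sents filter_sents filter_sents_alt
  obtain ⟨h1, _⟩ := hpre
  have hA1 : ∀ j (hj : j < sents.length),
      (decide (PySem.List.len sents[j] ≤ ms)) = true → 0 + j < tags.length := by
    intro j hj hp
    have := h1 j (by simpa using hj)
    simp only [List.getD_eq_getElem sents [] hj] at this
    simpa using this (by simpa using hp)
  rw [pvLoopA_eq _ tags sents 0 [] [] hA1]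
  simp only [List.drop_zero, List.nil_append]
  set ps1 := ((sents.zip tags).filter
      (fun p => decide (PySem.List.len p.1 ≤ ms))) with hps1
  have hA2 : ∀ j (hj : j < (ps1.map Prod.fst).length),
      (decide (pvMaxWordLen (ps1.map Prod.fst)[j] ≤ mw)) = true →
      0 + j < (ps1.map Prod.snd).length := by
    intro j hj _
    simp only [List.length_map] at hj ⊢
    omega
  rw [pvLoopA_eq _ _ _ 0 [] [] hA2]
  simp only [List.drop_zero, List.nil_append]
  rw [pvLoopB_eq]
  simp only [List.nil_append]
  have hz : (ps1.map Prod.fst).zip (ps1.map Prod.snd) = ps1 := by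
    rw [List.zip_map']; simp
  rw [hz, hps1, List.filter_filter]
  have hcomm : (sents.zip tags).filter
      (fun p => decide (pvMaxWordLen p.1 ≤ mw) && decide (PySem.List.len p.1 ≤ ms)) =
    (sents.zip tags).filter
      (fun p => decide (PySem.List.len p.1 ≤ ms) && decide (pvMaxWordLen p.1 ≤ mw)) :=
    List.filter_congr (fun p _ => Bool.and_comm ..)
  rw [hcomm]
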